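-- pv_equiv track=rewrite | github.com/knochenhans/retro_tools | map_display.py | erase_noncontinuous_values
-- ===== SOURCE A (Python) =====
-- def erase_noncontinuous_values(data, min_occurrence):
--     data_list = []
--
--     start_idx = None
--     count = 0
--
--     for idx, value in enumerate(data):
--         if value[0] == '0':
--             if start_idx is None:
--                 start_idx = idx
--             count += 1
--         else:
--             if start_idx is not None and count >= min_occurrence:
--                 data_list.append((start_idx, idx - 1))
--             start_idx = None
--             count = 0
--
--     if start_idx is not None and count >= min_occurrence:
--         data_list.append((start_idx, len(data) - 1))
--
--     result = ['0000'] * len(data)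
--
--     for start, end in data_list:
--         result[start:end+1] = data[start:end+1]
--
--     return result
-- ===== SOURCE B (Python) =====
-- def erase_noncontinuous_values(data, min_occurrence):
--     # One pass over maximal runs of same "starts with '0'" flag:
--     # keep qualifying zero-runs, replace everything else by '0000'.
--     result = []
--     i = 0
--     n = len(data)
--     while i < n:
--         is_zero = data[i][0] == '0'
--         j = i + 1
--         while j < n and (data[j][0] == '0') == is_zero:
--             j += 1
--         run = data[i:j]
--         if is_zero and len(run) >= min_occurrence:
--             result += run
--         else:
--             result += ['0000'] * len(run)
--         i = j
--     return result
-- ===== Notes on version B (the rewrite author's own statement) =====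
-- stated objective: simpler
-- what changed: A collects (start,end) index ranges of qualifying '0'-runs in one pass and then slice-assigns them into a pre-filled ['0000']*n list; B emits the output directly in a single pass over maximal runs (scan run, append it if it is a qualifying zero-run, else append its '0000' filler), with no range list and no slice assignment.
import Mathlib
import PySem

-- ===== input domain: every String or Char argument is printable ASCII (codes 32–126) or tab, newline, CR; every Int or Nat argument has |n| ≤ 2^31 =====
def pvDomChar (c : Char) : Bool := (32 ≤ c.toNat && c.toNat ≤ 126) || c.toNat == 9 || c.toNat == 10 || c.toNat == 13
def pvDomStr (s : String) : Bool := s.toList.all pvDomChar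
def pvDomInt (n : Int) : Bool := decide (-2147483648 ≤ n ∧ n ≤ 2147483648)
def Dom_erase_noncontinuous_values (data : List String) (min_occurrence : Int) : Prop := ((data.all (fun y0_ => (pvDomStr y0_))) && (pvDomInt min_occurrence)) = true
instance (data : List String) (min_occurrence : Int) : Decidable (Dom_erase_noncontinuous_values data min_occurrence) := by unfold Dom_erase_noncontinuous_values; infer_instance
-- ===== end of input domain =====

-- B replaces A's two-pass scheme (collect (start,end) ranges, then slice-assign into a '0000'-filled
-- array) by a single pass over maximal runs, appending each kept run or its '0000' filler directly
-- (objective: simpler, same asymptotic cost).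

-- ===== PORT A =====
-- value[0] == '0'  (Python raises IndexError on "", excluded by Pre_)
def pvIsZ (v : String) : Bool := PySem.Str.pyGet? v 0 == some '0'

-- one iteration of A's first for-loop; state = (data_list, start_idx, count)
def pvStepA (m : Int) (st : List (Int × Int) × Option Int × Int) (idx : Int) (v : String) :
    List (Int × Int) × Option Int × Int :=
  if pvIsZ v then
    (st.1, (match st.2.1 with | none => some idx | some s => some s), st.2.2 + 1)
  else
    ((match st.2.1 with
      | some s => if st.2.2 ≥ m then st.1 ++ [(s, idx - 1)] else st.1
      | none => st.1), none, 0)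

-- 'for idx, value in enumerate(data)' as structural recursion carrying the index
def pvLoopA (m : Int) : List String → Int → (List (Int × Int) × Option Int × Int) → (List (Int × Int) × Option Int × Int)
  | [], _, st => st
  | v :: rest, idx, st => pvLoopA m rest (idx + 1) (pvStepA m st idx v)

-- 'result[start:end+1] = data[start:end+1]'  (Python slice assignment: result[:s] + data[s:e+1] + result[e+1:])
def pvSplice (data : List String) (r : List String) (se : Int × Int) : List String :=
  PySem.List.slice r none (some se.1) ++ PySem.List.slice data (some se.1) (some (se.2 + 1)) ++
    PySem.List.slice r (some (se.2 + 1)) none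

def erase_noncontinuous_values (data : List String) (min_occurrence : Int) : List String :=
  let fin := pvLoopA min_occurrence data 0 ([], none, 0)
  let data_list := fin.1 ++ (match fin.2.1 with
      | some s => if fin.2.2 ≥ min_occurrence then [(s, (data.length : Int) - 1)] else []
      | none => [])
  data_list.foldl (pvSplice data) (List.replicate data.length "0000")

-- ===== PORT B =====
-- Source B's index scan of one maximal run (data[i:j]) is ported as takeWhile/dropWhile on the suffix:
-- the same elements are examined in the same order.
def pvAltGo (m : Int) : List String → List String
  | [] => []
  | v :: rest =>
    let b := pvIsZ v
    let run := List.takeWhile (fun x => pvIsZ x == b) (v :: rest)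
    let rest' := List.dropWhile (fun x => pvIsZ x == b) (v :: rest)
    (if b && decide (m ≤ (run.length : Int)) then run else List.replicate run.length "0000") ++
      pvAltGo m rest'
termination_by l => l.length
decreasing_by
  simp only [List.dropWhile_cons, beq_self_eq_true, if_true]
  exact Nat.lt_succ_of_le (List.length_dropWhile_le _ _)

def erase_noncontinuous_values_alt (data : List String) (min_occurrence : Int) : List String :=
  pvAltGo min_occurrence data

-- ===== PRECONDITION & SPEC =====
-- Pre_ excludes lists containing an empty string: there Python A (and Python B) raise IndexError on value[0].
def Pre_erase_noncontinuous_values (data : List String) (min_occurrence : Int) : Prop :=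
  ∀ s ∈ data, s ≠ ""
instance (data : List String) (min_occurrence : Int) : Decidable (Pre_erase_noncontinuous_values data min_occurrence) := by unfold Pre_erase_noncontinuous_values; infer_instance

def pvWitness_erase_noncontinuous_values : List String × Int := (["0001", "0002", "abc", "0003"], 2)

def Spec_erase_noncontinuous_values (data : List String) (min_occurrence : Int) (out : List String) : Prop := out = erase_noncontinuous_values_alt data min_occurrence
instance (data : List String) (min_occurrence : Int) (out : List String) : Decidable (Spec_erase_noncontinuous_values data min_occurrence out) := by unfold Spec_erase_noncontinuous_values; infer_instance

-- ===== CLAIM (what is proved, stated in full; the proofs are below) =====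
def Claim_equal_erase_noncontinuous_values : Prop := ∀ (data : List String) (min_occurrence : Int), Dom_erase_noncontinuous_values data min_occurrence → Pre_erase_noncontinuous_values data min_occurrence → Spec_erase_noncontinuous_values data min_occurrence (erase_noncontinuous_values data min_occurrence)

-- ===== LEMMAS AND PROOFS =====

-- Specification of A's first pass as a run-wise recursion: the (start,end) ranges of the
-- maximal '0'-runs of length ≥ m, at absolute offset `off`.
def pvRS (m : Int) : Int → List String → List (Int × Int)
  | _, [] => []
  | off, v :: rest =>
    let b := pvIsZ v
    let run := List.takeWhile (fun x => pvIsZ x == b) (v :: rest)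
    let rest' := List.dropWhile (fun x => pvIsZ x == b) (v :: rest)
    (if b && decide (m ≤ (run.length : Int)) then [(off, off + run.length - 1)] else []) ++
      pvRS m (off + run.length) rest'
termination_by _ l => l.length
decreasing_by
  simp only [List.dropWhile_cons, beq_self_eq_true, if_true]
  exact Nat.lt_succ_of_le (List.length_dropWhile_le _ _)

-- A's trailing 'if start_idx is not None and count >= min_occurrence' after the loop
def pvFinalize (m : Int) (endIdx : Int) (st : List (Int × Int) × Option Int × Int) : List (Int × Int) :=
  st.1 ++ (match st.2.1 with
    | some s => if st.2.2 ≥ m then [(s, endIdx)] else []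
    | none => [])

-- -- loop lemmas --

-- the element on which dropWhile stopped fails the predicate
theorem pvDropWhile_head_false {α : Type} (p : α → Bool) (l : List α) (x : α) (xs : List α)
    (h : l.dropWhile p = x :: xs) : p x = false := by
  have hne : l.dropWhile p ≠ [] := by simp [h]
  have h2 := List.head_dropWhile_not p hne
  have hx : (l.dropWhile p).head hne = x := by simp [h]
  rwa [hx] at h2

theorem pvLoopA_append (m : Int) (l1 l2 : List String) (idx : Int) (st : List (Int × Int) × Option Int × Int) :
    pvLoopA m (l1 ++ l2) idx st = pvLoopA m l2 (idx + l1.length) (pvLoopA m l1 idx st) := by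
  induction l1 generalizing idx st with
  | nil => simp [pvLoopA]
  | cons v t ih =>
    simp only [List.cons_append, pvLoopA, ih, List.length_cons]
    congr 1
    push_cast
    ring

theorem pvLoopA_zero_run (m : Int) (l : List String) (h : ∀ x ∈ l, pvIsZ x = true)
    (idx : Int) (dl : List (Int × Int)) (s c : Int) :
    pvLoopA m l idx (dl, some s, c) = (dl, some s, c + l.length) := by
  induction l generalizing idx c with
  | nil => simp [pvLoopA]
  | cons v t ih =>
    have hv : pvIsZ v = true := h v (by simp)
    simp only [pvLoopA, pvStepA, hv, if_true]
    rw [ih (fun x hx => h x (by simp [hx]))]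
    simp only [List.length_cons, Prod.mk.injEq, true_and]
    push_cast; ring

theorem pvLoopA_nonzero_run (m : Int) (l : List String) (h : ∀ x ∈ l, pvIsZ x = false)
    (idx : Int) (dl : List (Int × Int)) :
    pvLoopA m l idx (dl, none, 0) = (dl, none, 0) := by
  induction l generalizing idx with
  | nil => simp [pvLoopA]
  | cons v t ih =>
    have hv : pvIsZ v = false := h v (by simp)
    simp only [pvLoopA, pvStepA, hv, Bool.false_eq_true, if_false]
    exact ih (fun x hx => h x (by simp [hx])) _

-- A's ranges equal the run-wise specification
theorem pvRanges_eq (m : Int) : ∀ (n : Nat) (l : List String), l.length ≤ n →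
    ∀ (idx : Int) (dl : List (Int × Int)),
    pvFinalize m (idx + l.length - 1) (pvLoopA m l idx (dl, none, 0)) = dl ++ pvRS m idx l := by
  intro n
  induction n with
  | zero =>
    intro l hl idx dl
    have hnil : l = [] := List.length_eq_zero_iff.mp (Nat.le_zero.mp hl)
    subst hnil
    simp [pvLoopA, pvFinalize, pvRS]
  | succ n ih =>
    intro l hl idx dl
    match l with
    | [] => simp [pvLoopA, pvFinalize, pvRS]
    | v :: rest =>
      obtain ⟨b, hb⟩ : ∃ b, pvIsZ v = b := ⟨_, rfl⟩
      have hpv : (fun x => pvIsZ x == b) v = true := by simp [hb]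
      have htw : List.takeWhile (fun x => pvIsZ x == b) (v :: rest)
          = v :: List.takeWhile (fun x => pvIsZ x == b) rest := by
        simp [hpv]
      have hdw : List.dropWhile (fun x => pvIsZ x == b) (v :: rest)
          = List.dropWhile (fun x => pvIsZ x == b) rest := by
        simp [hpv]
      have hsplit : List.takeWhile (fun x => pvIsZ x == b) (v :: rest)
          ++ List.dropWhile (fun x => pvIsZ x == b) (v :: rest) = v :: rest :=
        List.takeWhile_append_dropWhile
      have hlen : (v :: rest).length
          = (List.takeWhile (fun x => pvIsZ x == b) (v :: rest)).length
            + (List.dropWhile (fun x => pvIsZ x == b) (v :: rest)).length := by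
        have := congrArg List.length hsplit
        simp only [List.length_append] at this
        omega
      have hrestlen : (List.dropWhile (fun x => pvIsZ x == b) (v :: rest)).length ≤ n := by
        rw [hdw]
        exact le_trans (List.length_dropWhile_le _ _) (by simpa using hl)
      have hmemrun : ∀ x ∈ List.takeWhile (fun x => pvIsZ x == b) (v :: rest),
          pvIsZ x = b := by
        intro x hx
        simpa using List.mem_takeWhile_imp hx
      have hRS : pvRS m idx (v :: rest)
          = (if b && decide (m ≤ ((List.takeWhile (fun x => pvIsZ x == b) (v :: rest)).length : Int))
              then [(idx, idx + (List.takeWhile (fun x => pvIsZ x == b) (v :: rest)).length - 1)] else [])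
            ++ pvRS m (idx + (List.takeWhile (fun x => pvIsZ x == b) (v :: rest)).length)
                (List.dropWhile (fun x => pvIsZ x == b) (v :: rest)) := by
        rw [pvRS, hb]
      rw [hRS]
      cases b with
      | false =>
        have hrunz : ∀ x ∈ List.takeWhile (fun x => pvIsZ x == false) (v :: rest),
            pvIsZ x = false := hmemrun
        have hloop : pvLoopA m (v :: rest) idx (dl, none, 0)
            = pvLoopA m (List.dropWhile (fun x => pvIsZ x == false) (v :: rest))
                (idx + (List.takeWhile (fun x => pvIsZ x == false) (v :: rest)).length) (dl, none, 0) := by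
          conv_lhs => rw [← hsplit]
          rw [pvLoopA_append, pvLoopA_nonzero_run m _ hrunz]
        rw [hloop]
        simp only [Bool.false_and, Bool.false_eq_true, if_false, List.nil_append]
        have := ih _ hrestlen
            (idx + (List.takeWhile (fun x => pvIsZ x == false) (v :: rest)).length) dl
        rw [← this]
        congr 1
        rw [hlen]; push_cast; ring
      | true =>
        have hrunz : ∀ x ∈ List.takeWhile (fun x => pvIsZ x == true) rest,
            pvIsZ x = true := fun x hx =>
          hmemrun x (by rw [htw]; exact List.mem_cons_of_mem _ hx)
        have hloopr : pvLoopA m (List.takeWhile (fun x => pvIsZ x == true) (v :: rest)) idx (dl, none, 0)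
            = (dl, some idx, ((List.takeWhile (fun x => pvIsZ x == true) (v :: rest)).length : Int)) := by
          rw [htw, pvLoopA]
          simp only [pvStepA, hb, if_true]
          rw [pvLoopA_zero_run m _ hrunz]
          simp only [List.length_cons, Prod.mk.injEq, true_and]
          push_cast; ring
        have hloop : pvLoopA m (v :: rest) idx (dl, none, 0)
            = pvLoopA m (List.dropWhile (fun x => pvIsZ x == true) (v :: rest))
                (idx + (List.takeWhile (fun x => pvIsZ x == true) (v :: rest)).length)
                (dl, some idx, ((List.takeWhile (fun x => pvIsZ x == true) (v :: rest)).length : Int)) := by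
          conv_lhs => rw [← hsplit]
          rw [pvLoopA_append, hloopr]
        rw [hloop]
        rcases hdwr : List.dropWhile (fun x => pvIsZ x == true) (v :: rest) with _ | ⟨w, rest''⟩
        · -- data ends inside the zero run: the trailing append fires
          rw [pvLoopA]
          have hlen' : (v :: rest).length
              = (List.takeWhile (fun x => pvIsZ x == true) (v :: rest)).length := by
            rw [hlen, hdwr]; simp
          rw [pvRS]
          simp only [pvFinalize, List.append_nil]
          by_cases hm : m ≤ ((List.takeWhile (fun x => pvIsZ x == true) (v :: rest)).length : Int)
          · simp only [ge_iff_le, hm, if_true, decide_true, Bool.and_true, if_true, hlen']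
          · simp only [ge_iff_le, hm, if_false, decide_false, Bool.and_false,
              Bool.false_eq_true, if_false, List.append_nil]
        · -- a non-zero element follows the run
          have hw : pvIsZ w = false := by
            simpa using pvDropWhile_head_false _ _ _ _ hdwr
          have hstep : pvLoopA m (w :: rest'')
                (idx + ((List.takeWhile (fun x => pvIsZ x == true) (v :: rest)).length : Int))
                (dl, some idx, ((List.takeWhile (fun x => pvIsZ x == true) (v :: rest)).length : Int))
              = pvLoopA m (w :: rest'')
                (idx + ((List.takeWhile (fun x => pvIsZ x == true) (v :: rest)).length : Int))
                ((if m ≤ ((List.takeWhile (fun x => pvIsZ x == true) (v :: rest)).length : Int)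
                    then dl ++ [(idx, idx + (List.takeWhile (fun x => pvIsZ x == true) (v :: rest)).length - 1)]
                    else dl), none, 0) := by
            rw [pvLoopA, pvLoopA]
            simp only [pvStepA, hw, Bool.false_eq_true, if_false, ge_iff_le]
          rw [hstep]
          have hih := ih (w :: rest'') (by rw [← hdwr]; exact hrestlen)
              (idx + ((List.takeWhile (fun x => pvIsZ x == true) (v :: rest)).length : Int))
              (if m ≤ ((List.takeWhile (fun x => pvIsZ x == true) (v :: rest)).length : Int)
                  then dl ++ [(idx, idx + (List.takeWhile (fun x => pvIsZ x == true) (v :: rest)).length - 1)]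
                  else dl)
          rw [← hdwr] at hstep hih ⊢
          have hend : idx + ((v :: rest).length : Int) - 1
              = idx + ((List.takeWhile (fun x => pvIsZ x == true) (v :: rest)).length : Int)
                + ((List.dropWhile (fun x => pvIsZ x == true) (v :: rest)).length : Int) - 1 := by
            rw [hlen]; push_cast; ring
          rw [hend, hih]
          by_cases hm : m ≤ ((List.takeWhile (fun x => pvIsZ x == true) (v :: rest)).length : Int)
          · simp only [hm, if_true, decide_true, Bool.and_true,
              List.append_assoc, List.singleton_append]
          · simp only [hm, if_false, decide_false, Bool.and_false,
              Bool.false_eq_true, if_false, List.nil_append]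

-- -- render lemmas --

theorem pvSplice_eq (d r : List String) (s e : Int) (hs : 0 ≤ s) (he : 0 ≤ e + 1) :
    pvSplice d r (s, e) =
      r.take s.toNat ++ (d.drop s.toNat).take ((e + 1).toNat - s.toNat) ++ r.drop (e + 1).toNat := by
  unfold pvSplice
  rw [PySem.List.slice_to r hs, PySem.List.slice_toNat d hs he, PySem.List.slice_from r he]

theorem pvSplice_append (dpre dtail p q : List String) (hk : p.length = dpre.length)
    (s e : Int) (hs : 0 ≤ s) (hse : s ≤ e) :
    pvSplice (dpre ++ dtail) (p ++ q) (s + (p.length : Int), e + (p.length : Int))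
      = p ++ pvSplice dtail q (s, e) := by
  have h1 : (0:Int) ≤ s + p.length := by positivity
  have h2 : (0:Int) ≤ e + (p.length : Int) + 1 := by omega
  have he : (0:Int) ≤ e + 1 := by omega
  rw [pvSplice_eq _ _ _ _ h1 h2, pvSplice_eq _ _ _ _ hs he]
  have hts : (s + (p.length : Int)).toNat = s.toNat + p.length := by omega
  have hte : (e + (p.length : Int) + 1).toNat = (e + 1).toNat + p.length := by omega
  rw [hts, hte]
  have htake : (p ++ q).take (s.toNat + p.length) = p ++ q.take s.toNat := by
    rw [Nat.add_comm, List.take_length_add_append]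
  have hdropd : (dpre ++ dtail).drop (s.toNat + p.length) = dtail.drop s.toNat := by
    rw [Nat.add_comm, hk, List.drop_length_add_append]
  have hdropr : (p ++ q).drop ((e + 1).toNat + p.length) = q.drop (e + 1).toNat := by
    rw [Nat.add_comm, List.drop_length_add_append]
  rw [htake, hdropd, hdropr]
  have hsub : (e + 1).toNat + p.length - (s.toNat + p.length) = (e + 1).toNat - s.toNat := by omega
  rw [hsub]
  simp [List.append_assoc]

theorem pvRender_shift : ∀ (rs : List (Int × Int)) (p q dpre dtail : List String),
    p.length = dpre.length → (∀ r ∈ rs, 0 ≤ r.1 ∧ r.1 ≤ r.2) →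
    List.foldl (pvSplice (dpre ++ dtail)) (p ++ q)
        (rs.map (fun r => (r.1 + (p.length : Int), r.2 + (p.length : Int)))) =
      p ++ List.foldl (pvSplice dtail) q rs := by
  intro rs
  induction rs with
  | nil => intro p q dpre dtail _ _; simp
  | cons r t ih =>
    intro p q dpre dtail hk hb
    obtain ⟨h1, h2⟩ := hb r (by simp)
    simp only [List.map_cons, List.foldl_cons]
    rw [pvSplice_append dpre dtail p q hk r.1 r.2 h1 h2]
    exact ih p _ dpre dtail hk (fun x hx => hb x (by simp [hx]))

theorem pvRS_shift (m : Int) : ∀ (n : Nat) (l : List String), l.length ≤ n → ∀ (a c : Int),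
    pvRS m (a + c) l = (pvRS m a l).map (fun r => (r.1 + c, r.2 + c)) := by
  intro n
  induction n with
  | zero =>
    intro l hl a c
    have hnil : l = [] := List.length_eq_zero_iff.mp (Nat.le_zero.mp hl)
    subst hnil; simp [pvRS]
  | succ n ih =>
    intro l hl a c
    match l with
    | [] => simp [pvRS]
    | v :: rest =>
      rw [pvRS]; rw [pvRS]
      have hdwlen : (List.dropWhile (fun x => pvIsZ x == pvIsZ v) (v :: rest)).length ≤ n := by
        have h : List.dropWhile (fun x => pvIsZ x == pvIsZ v) (v :: rest)
            = List.dropWhile (fun x => pvIsZ x == pvIsZ v) rest := by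
          simp
        rw [h]
        exact le_trans (List.length_dropWhile_le _ _) (by simpa using hl)
      have h1 : a + c + ((List.takeWhile (fun x => pvIsZ x == pvIsZ v) (v :: rest)).length : Int)
          = a + ((List.takeWhile (fun x => pvIsZ x == pvIsZ v) (v :: rest)).length : Int) + c := by ring
      rw [List.map_append, h1, ih _ hdwlen]
      congr 1
      split_ifs
      · simp only [List.map_cons, List.map_nil, List.cons.injEq, Prod.mk.injEq, true_and, and_true]
        ring
      · rfl

theorem pvRS_bounds (m : Int) : ∀ (n : Nat) (l : List String), l.length ≤ n → ∀ (idx : Int),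
    ∀ r ∈ pvRS m idx l, idx ≤ r.1 ∧ r.1 ≤ r.2 := by
  intro n
  induction n with
  | zero =>
    intro l hl idx r hr
    have hnil : l = [] := List.length_eq_zero_iff.mp (Nat.le_zero.mp hl)
    subst hnil; simp [pvRS] at hr
  | succ n ih =>
    intro l hl idx r hr
    match l with
    | [] => simp [pvRS] at hr
    | v :: rest =>
      rw [pvRS] at hr
      have hdwlen : (List.dropWhile (fun x => pvIsZ x == pvIsZ v) (v :: rest)).length ≤ n := by
        have h : List.dropWhile (fun x => pvIsZ x == pvIsZ v) (v :: rest)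
            = List.dropWhile (fun x => pvIsZ x == pvIsZ v) rest := by
          simp
        rw [h]
        exact le_trans (List.length_dropWhile_le _ _) (by simpa using hl)
      have hk1 : 1 ≤ (List.takeWhile (fun x => pvIsZ x == pvIsZ v) (v :: rest)).length := by
        have h : List.takeWhile (fun x => pvIsZ x == pvIsZ v) (v :: rest)
            = v :: List.takeWhile (fun x => pvIsZ x == pvIsZ v) rest := by
          simp
        rw [h]; simp
      rcases List.mem_append.mp hr with h | h
      · split_ifs at h with hc
        · simp only [List.mem_singleton] at h
          subst h
          constructor
          · exact le_refl _
          · simp only []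
            have : (1:Int) ≤ ((List.takeWhile (fun x => pvIsZ x == pvIsZ v) (v :: rest)).length : Int) := by
              exact_mod_cast hk1
            omega
        · simp at h
      · have := ih _ hdwlen
            (idx + ((List.takeWhile (fun x => pvIsZ x == pvIsZ v) (v :: rest)).length : Int)) r h
        have hnn : (0:Int) ≤ ((List.takeWhile (fun x => pvIsZ x == pvIsZ v) (v :: rest)).length : Int) := by positivity
        exact ⟨by omega, this.2⟩

-- rendering the specification ranges is exactly B
theorem pvRender_eq (m : Int) : ∀ (n : Nat) (l : List String), l.length ≤ n →
    (pvRS m 0 l).foldl (pvSplice l) (List.replicate l.length "0000") = pvAltGo m l := by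
  intro n
  induction n with
  | zero =>
    intro l hl
    have hnil : l = [] := List.length_eq_zero_iff.mp (Nat.le_zero.mp hl)
    subst hnil; simp [pvRS, pvAltGo]
  | succ n ih =>
    intro l hl
    match l with
    | [] => simp [pvRS, pvAltGo]
    | v :: rest =>
      rw [pvRS, pvAltGo]
      simp only [zero_add]
      set run := List.takeWhile (fun x => pvIsZ x == pvIsZ v) (v :: rest) with hrundef
      set dw := List.dropWhile (fun x => pvIsZ x == pvIsZ v) (v :: rest) with hdwdef
      have hsplit : run ++ dw = v :: rest := List.takeWhile_append_dropWhile
      have hlen : (v :: rest).length = run.length + dw.length := by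
        rw [← hsplit]; simp
      have hdwlen : dw.length ≤ n := by
        rw [hdwdef]
        have h : List.dropWhile (fun x => pvIsZ x == pvIsZ v) (v :: rest)
            = List.dropWhile (fun x => pvIsZ x == pvIsZ v) rest := by
          simp
        rw [h]
        exact le_trans (List.length_dropWhile_le _ _) (by simpa using hl)
      have hbd : ∀ r ∈ pvRS m 0 dw, 0 ≤ r.1 ∧ r.1 ≤ r.2 :=
        fun r hr => pvRS_bounds m n dw hdwlen 0 r hr
      have hshift := pvRS_shift m n dw hdwlen 0 (run.length : Int)
      simp only [zero_add] at hshift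
      rw [hshift]
      cases hq : (pvIsZ v && decide (m ≤ (run.length : Int))) with
      | true =>
        simp only [if_true]
        rw [List.singleton_append, List.foldl_cons]
        have hfirst : pvSplice (v :: rest) (List.replicate (v :: rest).length "0000")
            (0, (run.length : Int) - 1) = run ++ List.replicate dw.length "0000" := by
          rw [pvSplice_eq _ _ _ _ le_rfl (by omega)]
          have h1 : ((run.length : Int) - 1 + 1) = (run.length : Int) := by ring
          rw [h1]
          simp only [Int.toNat_zero, Int.toNat_natCast, List.take_zero, List.drop_zero,
            List.nil_append, Nat.sub_zero, List.drop_replicate]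
          have h2 : (v :: rest).take run.length = run := by
            rw [← hsplit]; exact List.take_left
          have h3 : (v :: rest).length - run.length = dw.length := by omega
          rw [h2, h3]
        rw [hfirst]
        have hrender := pvRender_shift (pvRS m 0 dw) run (List.replicate dw.length "0000")
            run dw rfl hbd
        rw [hsplit] at hrender
        rw [hrender, ih dw hdwlen]
      | false =>
        simp only [Bool.false_eq_true, if_false]
        have hrep : List.replicate (v :: rest).length "0000"
            = List.replicate run.length "0000" ++ List.replicate dw.length "0000" := by
          rw [hlen, List.replicate_add]
        rw [hrep]
        rw [List.nil_append]
        have hrender := pvRender_shift (pvRS m 0 dw) (List.replicate run.length "0000")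
            (List.replicate dw.length "0000") run dw (by simp) hbd
        simp only [List.length_replicate] at hrender
        rw [hsplit] at hrender
        rw [hrender, ih dw hdwlen]

-- ===== VERDICT (by name: the statement is the Claim_ definition above) =====
theorem erase_noncontinuous_values_spec : Claim_equal_erase_noncontinuous_values := by
  intro data m _ _
  have h1 := pvRanges_eq m data.length data le_rfl 0 []
  simp only [zero_add, List.nil_append] at h1
  show erase_noncontinuous_values data m = erase_noncontinuous_values_alt data m
  change List.foldl (pvSplice data) (List.replicate data.length "0000")
      (pvFinalize m ((data.length : Int) - 1) (pvLoopA m data 0 ([], none, 0))) = pvAltGo m data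
  rw [h1]
  exact pvRender_eq m data.length data le_rfl
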